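-- pv_equiv track=rewrite | github.com/svend4/meta | projects/hexpack/hexpack.py | valid_periods
-- ===== SOURCE A (Python) =====
-- def _triangular(n: int) -> int:
--     """T(n) = n*(n-1)//2 = 0+1+2+...+(n-1)."""
--     return n * (n - 1) // 2
--
-- def _is_power_of_two(n: int) -> bool:
--     return n > 0 and (n & (n - 1)) == 0
--
-- def period(n: int) -> int:
--     """Период поля для упаковки n чисел: P = n(n-1)/2 + 1."""
--     return _triangular(n) + 1
--
-- def valid_periods(max_n: int = 64) -> list[tuple[int, int]]:
--     """Все пары (n, P) с P = 2^k для n = 1..max_n."""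
--     result = []
--     for n in range(1, max_n + 1):
--         P = period(n)
--         if _is_power_of_two(P):
--             k = P.bit_length() - 1
--             result.append((n, P, k))
--     return result
-- ===== SOURCE B (Python) =====
-- def _isqrt(n: int) -> int:
--     """Floor integer square root by Newton's method (no imports needed)."""
--     if n <= 1:
--         return n
--     x = n // 2
--     while True:
--         y = (x + n // x) // 2
--         if y < x:
--             x = y
--         else:
--             return x
--
-- def valid_periods(max_n: int = 64) -> list[tuple[int, int]]:
--     """Iterate over powers of two P = 2^k <= n(n-1)/2 + 1 at n = max_n and
--     recover n from P by solving n(n-1)/2 = P - 1 with an integer square root: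
--     O(log max_n) loop iterations instead of O(max_n)."""
--     result = []
--     if max_n < 1:
--         return result
--     p_max = max_n * (max_n - 1) // 2 + 1
--     k, P = 0, 1
--     while P <= p_max:
--         m = 8 * (P - 1) + 1
--         s = _isqrt(m)
--         if s * s == m:
--             result.append(((1 + s) // 2, P, k))
--         k += 1
--         P *= 2
--     return result
-- ===== Notes on version B (the rewrite author's own statement) =====
-- stated objective: faster
-- what changed: Instead of scanning every n in 1..max_n and bit-testing whether n(n-1)/2+1 is a power of two, B iterates over the powers of two P = 2^k up to max_n(max_n-1)/2+1 and recovers n from P by solving n(n-1)/2 = P-1 with a Newton integer square root.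
import Mathlib
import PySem

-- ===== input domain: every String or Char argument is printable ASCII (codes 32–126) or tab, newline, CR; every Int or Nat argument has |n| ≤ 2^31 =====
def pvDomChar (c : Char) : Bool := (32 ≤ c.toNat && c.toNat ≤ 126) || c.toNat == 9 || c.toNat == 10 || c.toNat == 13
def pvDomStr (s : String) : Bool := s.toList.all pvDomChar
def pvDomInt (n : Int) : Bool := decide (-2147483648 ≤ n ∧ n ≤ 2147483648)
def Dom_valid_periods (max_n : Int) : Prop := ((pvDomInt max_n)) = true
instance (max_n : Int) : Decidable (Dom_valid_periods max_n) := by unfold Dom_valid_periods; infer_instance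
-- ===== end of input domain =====

-- B replaces A's O(max_n) scan over n with a loop over the O(log max_n) powers of two
-- P = 2^k ≤ n(n-1)/2 + 1, recovering n from P by an integer square root.

-- ===== PORT A =====
-- _triangular(n) = n*(n-1)//2 ; period(n) = _triangular(n)+1 ; _is_power_of_two via n & (n-1)
def valid_periods (max_n : Int) : List (List Int) :=
  (PySem.List.pyRange 1 (max_n + 1) 1).foldl
    (fun result n =>
      let P : Int := PySem.Int.floordiv (n * (n - 1)) 2 + 1
      if 0 < P ∧ PySem.Int.band P (P - 1) = 0 then
        result ++ [[n, P, (PySem.Int.bitLength P : Int) - 1]]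
      else result) []

-- ===== PORT B =====
-- _isqrt: Newton's method, exactly Source B's loop (x = n//2; y = (x + n//x)//2; descend while y < x)
def isqrtIter (n g : Nat) : Nat :=
  let next := (g + n / g) / 2
  if _h : next < g then isqrtIter n next else g
termination_by g

def isqrtNat (n : Nat) : Nat := if n ≤ 1 then n else isqrtIter n (n / 2)

-- Source B's while-loop: k, P = 0, 1; while P <= p_max: … ; k += 1; P *= 2.
-- P stays ≥ 1 (it starts at 1 and doubles); the `0 < P` conjunct only makes termination evident.
def altLoop (pmax k P : Nat) (result : List (List Int)) : List (List Int) :=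
  if h : 0 < P ∧ P ≤ pmax then
    let m := 8 * (P - 1) + 1
    let s := isqrtNat m
    let result' := if s * s = m then result ++ [[(((1 + s) / 2 : Nat) : Int), ((P : Nat) : Int), ((k : Nat) : Int)]] else result
    altLoop pmax (k + 1) (2 * P) result'
  else result
termination_by pmax + 1 - P
decreasing_by omega

def valid_periods_alt (max_n : Int) : List (List Int) :=
  if max_n < 1 then []
  else altLoop (PySem.Int.floordiv (max_n * (max_n - 1)) 2 + 1).toNat 0 1 []

-- ===== PRECONDITION & SPEC =====
def Spec_valid_periods (max_n : Int) (out : List (List Int)) : Prop := out = valid_periods_alt max_n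
instance (max_n : Int) (out : List (List Int)) : Decidable (Spec_valid_periods max_n out) := by unfold Spec_valid_periods; infer_instance

-- ===== CLAIM (what is proved, stated in full; the proofs are below) =====
def Claim_equal_valid_periods : Prop := ∀ (max_n : Int), Dom_valid_periods max_n → Spec_valid_periods max_n (valid_periods max_n)

-- ===== LEMMAS AND PROOFS =====

-- triangular number over Nat
def tn (n : Nat) : Nat := n * (n - 1) / 2

lemma two_tn (n : Nat) : 2 * tn n = n * (n - 1) := by
  unfold tn
  have h : 2 ∣ n * (n - 1) := by
    cases n with
    | zero => simp
    | succ m =>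
      have : (m + 1) * (m + 1 - 1) = m * (m + 1) := by
        simp only [Nat.succ_sub_one]; ring
      rw [this]
      exact (Nat.even_mul_succ_self m).two_dvd
  omega

lemma tn_mono {n m : Nat} (h : n ≤ m) : tn n ≤ tn m := by
  have h1 := two_tn n; have h2 := two_tn m
  have : n * (n - 1) ≤ m * (m - 1) := Nat.mul_le_mul h (by omega)
  omega

lemma tn_succ (n : Nat) : tn (n + 1) = tn n + n := by
  cases n with
  | zero => simp [tn]
  | succ m =>
    have h1 := two_tn (m + 1); have h2 := two_tn (m + 1 + 1)
    have e : (m + 1 + 1) * (m + 1 + 1 - 1) = (m + 1) * (m + 1 - 1) + 2 * (m + 1) := by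
      simp only [Nat.succ_sub_one]; ring
    omega

lemma tn_lt_of_lt {n m : Nat} (h1 : 1 ≤ n) (h2 : n < m) : tn n < tn m := by
  have := tn_succ n
  have := tn_mono (show n + 1 ≤ m by omega)
  omega

-- ===== Newton isqrt is Nat.sqrt =====
lemma isqrt_step_ge (n g : Nat) (h1 : 1 ≤ g) :
    Nat.sqrt n ≤ (g + n / g) / 2 := by
  set s := Nat.sqrt n with hs
  by_cases hc : 2 * s ≤ g
  · have : 0 ≤ n / g := Nat.zero_le _
    omega
  · -- s ≤ g < 2s : need (2s - g) * g ≤ n, since (2s-g)*g ≤ s*s ≤ n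
    have hsle : s * s ≤ n := Nat.sqrt_le n
    have key : (2 * s - g) * g ≤ n := by
      have hgle : g ≤ 2 * s := by omega
      have : (2 * s - g) * g ≤ s * s := by
        zify [hgle]
        nlinarith [sq_nonneg ((g : Int) - s)]
      omega
    have : 2 * s - g ≤ n / g := (Nat.le_div_iff_mul_le (by omega)).mpr key
    omega

lemma isqrtIter_eq (n : Nat) : ∀ g, Nat.sqrt n ≤ g → 1 ≤ Nat.sqrt n → isqrtIter n g = Nat.sqrt n := by
  intro g
  induction g using Nat.strong_induction_on with
  | _ g ih =>
    intro hg h1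
    rw [isqrtIter]
    split
    · rename_i h
      exact ih _ h (isqrt_step_ge n g (by omega)) h1
    · rename_i h
      -- g ≤ (g + n/g)/2  ⇒  g*g ≤ n  ⇒  g ≤ sqrt n
      have hg1 : 1 ≤ g := by omega
      have h2 : g * 2 ≤ g + n / g := by
        have := (Nat.le_div_iff_mul_le (show 0 < 2 by omega)).mp (by omega : g ≤ (g + n / g) / 2)
        omega
      have h3 : g ≤ n / g := by omega
      have h4 : g * g ≤ n := by
        have := (Nat.le_div_iff_mul_le (show 0 < g by omega)).mp h3
        omega
      have : g ≤ Nat.sqrt n := Nat.le_sqrt.mpr h4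
      omega

lemma isqrtNat_eq_sqrt (n : Nat) : isqrtNat n = Nat.sqrt n := by
  unfold isqrtNat
  split
  · rename_i h
    interval_cases n <;> decide
  · rename_i h
    apply isqrtIter_eq
    · -- sqrt n ≤ n / 2 for n ≥ 2
      have hq : 1 ≤ n / 2 := by omega
      have hh : 1 ≤ (n / 2) * (n / 2) := Nat.mul_pos hq hq
      have hn : n ≤ 2 * (n / 2) + 1 := by omega
      have : n < (n / 2 + 1) * (n / 2 + 1) := by nlinarith
      have := Nat.sqrt_lt.mpr this
      omega
    · exact Nat.sqrt_pos.mpr (by omega)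

-- ===== power-of-two bit trick =====
lemma land_pred_eq_zero_iff : ∀ n : Nat, 0 < n → ((n &&& (n - 1)) = 0 ↔ ∃ j, n = 2 ^ j) := by
  intro n
  induction n using Nat.strong_induction_on with
  | _ n ih =>
    intro hn
    rcases Nat.even_or_odd n with ⟨m, hm⟩ | ⟨m, hm⟩
    · have h0 : 0 < m := by omega
      have e1 : n = Nat.bit false m := by simp [Nat.bit]; omega
      have e2 : n - 1 = Nat.bit true (m - 1) := by simp [Nat.bit]; omega
      have key : n &&& (n - 1) = 2 * (m &&& (m - 1)) := by
        rw [e2, e1, Nat.land_bit]; simp [Nat.bit]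
      rw [key]
      constructor
      · intro h
        obtain ⟨j, hj⟩ := (ih m (by omega) h0).mp (by omega)
        refine ⟨j + 1, ?_⟩
        rw [pow_succ]; omega
      · rintro ⟨j, hj⟩
        cases j with
        | zero => simp at hj; omega
        | succ i =>
          rw [pow_succ] at hj
          have hm2 : m = 2 ^ i := by omega
          have := (ih m (by omega) h0).mpr ⟨i, hm2⟩
          omega
    · cases m with
      | zero =>
        have : n = 1 := by omega
        subst this
        constructor
        · intro _; exact ⟨0, by norm_num⟩
        · intro _; decide
      | succ i =>
        have e1 : n = Nat.bit true (i + 1) := by simp [Nat.bit]; omega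
        have e2 : n - 1 = Nat.bit false (i + 1) := by simp [Nat.bit]; omega
        have key : n &&& (n - 1) = 2 * (i + 1) := by
          rw [e2, e1, Nat.land_bit]; simp [Nat.bit]
        rw [key]
        constructor
        · intro h; omega
        · rintro ⟨j, hj⟩
          cases j with
          | zero => simp at hj; omega
          | succ i' =>
            rw [pow_succ] at hj
            omega

-- bitLength of a power of two
lemma bitLength_pow (j : Nat) : PySem.Int.bitLength ((2 ^ j : Nat) : Int) = j + 1 := by
  induction j with
  | zero => decide
  | succ j ih =>
    rw [PySem.Int.bitLength_natCast (by positivity)]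
    have : 2 ^ (j + 1) / 2 = 2 ^ j := by
      rw [pow_succ, Nat.mul_div_cancel]; omega
    rw [this, ih]

-- ===== the square-root correspondence =====
lemma sqrt_of_tn (n : Nat) (h1 : 1 ≤ n) : Nat.sqrt (8 * tn n + 1) = 2 * n - 1 := by
  have h2 := two_tn n
  have e : (2 * n - 1) * (2 * n - 1) = 4 * (n * (n - 1)) + 1 := by
    zify [h1, show 1 ≤ 2 * n by omega]
    ring
  have : 8 * tn n + 1 = (2 * n - 1) * (2 * n - 1) := by omega
  rw [this, Nat.sqrt_eq]

lemma tn_of_sqrt (t : Nat) (h : Nat.sqrt (8 * t + 1) * Nat.sqrt (8 * t + 1) = 8 * t + 1) :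
    ∃ n, 1 ≤ n ∧ tn n = t ∧ (1 + Nat.sqrt (8 * t + 1)) / 2 = n := by
  set s := Nat.sqrt (8 * t + 1) with hs
  rcases Nat.even_or_odd s with he | ho
  · obtain ⟨v, hv⟩ := he
    have e : (v + v) * (v + v) = 4 * (v * v) := by ring
    rw [hv, e] at h
    omega
  · obtain ⟨u, hu⟩ := ho
    refine ⟨u + 1, by omega, ?_, by omega⟩
    have h2 : 2 * tn (u + 1) = (u + 1) * u := by simpa using two_tn (u + 1)
    have e : (2 * u + 1) * (2 * u + 1) = 4 * (u * (u + 1)) + 1 := by ring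
    rw [hu, e] at h
    have comm : (u + 1) * u = u * (u + 1) := by ring
    omega

-- ===== closed form of port A =====
def pA (n : Nat) : Bool := ((tn n + 1) &&& tn n) == 0
def fA (n : Nat) : List Int := [(n : Int), ((tn n + 1 : Nat) : Int), (PySem.Int.bitLength ((tn n + 1 : Nat) : Int) : Int) - 1]

lemma tri_int (k : Nat) : PySem.Int.floordiv ((k : Int) * ((k : Int) - 1)) 2 + 1 = ((tn k + 1 : Nat) : Int) := by
  have : (k : Int) * ((k : Int) - 1) = ((k * (k - 1) : Nat) : Int) := by
    cases k with
    | zero => simp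
    | succ m => push_cast; ring
  rw [this]
  have h2 : ((2 : Nat) : Int) = 2 := rfl
  rw [← h2, PySem.Int.floordiv_natCast]
  unfold tn
  push_cast
  ring

lemma body_pred (k : Nat) :
    (decide (0 < PySem.Int.floordiv ((1 + (k : Int)) * ((1 + (k : Int)) - 1)) 2 + 1 ∧
      PySem.Int.band (PySem.Int.floordiv ((1 + (k : Int)) * ((1 + (k : Int)) - 1)) 2 + 1)
        (PySem.Int.floordiv ((1 + (k : Int)) * ((1 + (k : Int)) - 1)) 2 + 1 - 1) = 0)) = pA (k + 1) := by
  have hc : (1 + (k : Int)) = ((k + 1 : Nat) : Int) := by push_cast; ring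
  rw [hc, tri_int (k + 1)]
  have h1 : ((tn (k + 1) + 1 : Nat) : Int) - 1 = ((tn (k + 1) : Nat) : Int) := by push_cast; ring
  rw [h1, PySem.Int.band_natCast]
  simp [pA]
  cases hq : (tn (k + 1) + 1 &&& tn (k + 1)) == 0 <;> simp_all

lemma body_fun (k : Nat) :
    [(1 + (k : Int)), PySem.Int.floordiv ((1 + (k : Int)) * ((1 + (k : Int)) - 1)) 2 + 1,
      (PySem.Int.bitLength (PySem.Int.floordiv ((1 + (k : Int)) * ((1 + (k : Int)) - 1)) 2 + 1) : Int) - 1] =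
    fA (k + 1) := by
  have hc : (1 + (k : Int)) = ((k + 1 : Nat) : Int) := by push_cast; ring
  rw [hc, tri_int (k + 1)]
  rfl

lemma valid_periods_eq (max_n : Int) (_h : 1 ≤ max_n) :
    valid_periods max_n = ((List.range max_n.toNat).filter (fun j => pA (j + 1))).map (fun j => fA (j + 1)) := by
  unfold valid_periods
  rw [PySem.List.pyRange_one]
  have e : (max_n + 1 - 1) = max_n := by ring
  rw [e, List.foldl_map]
  rw [PySem.List.foldl_append_ite]
  rw [List.nil_append]
  congr 1
  · funext k
    exact body_fun k
  · apply List.filter_congr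
    intro k _
    exact body_pred k

-- ===== closed form of port B =====
def qB (j : Nat) : Bool := isqrtNat (8 * (2 ^ j - 1) + 1) * isqrtNat (8 * (2 ^ j - 1) + 1) == 8 * (2 ^ j - 1) + 1
def fB (j : Nat) : List Int := [(((1 + isqrtNat (8 * (2 ^ j - 1) + 1)) / 2 : Nat) : Int), ((2 ^ j : Nat) : Int), (j : Int)]

lemma altLoop_eq (pmax : Nat) (hp : 1 ≤ pmax) :
    ∀ d k acc, d = Nat.log2 pmax + 1 - k →
      altLoop pmax k (2 ^ k) acc = acc ++ ((List.range' k d).filter qB).map fB := by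
  intro d
  induction d with
  | zero =>
    intro k acc hd
    have hk : Nat.log2 pmax + 1 ≤ k := by omega
    have hlt : pmax < 2 ^ k :=
      lt_of_lt_of_le Nat.lt_log2_self (Nat.pow_le_pow_right (by omega) hk)
    rw [altLoop]
    rw [dif_neg (by omega)]
    simp
  | succ d ih =>
    intro k acc hd
    have hk : k ≤ Nat.log2 pmax := by omega
    have hle : 2 ^ k ≤ pmax :=
      le_trans (Nat.pow_le_pow_right (by omega) hk) (Nat.log2_self_le (by omega))
    rw [altLoop]
    rw [dif_pos ⟨Nat.two_pow_pos k, hle⟩]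
    have h2 : 2 * 2 ^ k = 2 ^ (k + 1) := by rw [pow_succ]; ring
    rw [h2, ih (k + 1) _ (by omega)]
    rw [List.range'_succ, List.filter_cons]
    unfold qB fB
    by_cases hq : isqrtNat (8 * (2 ^ k - 1) + 1) * isqrtNat (8 * (2 ^ k - 1) + 1) = 8 * (2 ^ k - 1) + 1
    · rw [if_pos hq]
      simp [hq]
    · rw [if_neg hq]
      simp [hq]


lemma valid_periods_alt_eq (max_n : Int) (h : 1 ≤ max_n) :
    valid_periods_alt max_n =
      ((List.range (Nat.log2 (tn max_n.toNat + 1) + 1)).filter qB).map fB := by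
  obtain ⟨M, hM⟩ : ∃ M : Nat, max_n = (M : Int) := ⟨max_n.toNat, by omega⟩
  subst hM
  unfold valid_periods_alt
  rw [if_neg (by omega)]
  rw [tri_int M]
  rw [show ((tn M + 1 : Nat) : Int).toNat = tn M + 1 from by omega]
  rw [Int.toNat_natCast]
  have : altLoop (tn M + 1) 0 1 [] = altLoop (tn M + 1) 0 (2 ^ 0) [] := rfl
  rw [this]
  rw [altLoop_eq (tn M + 1) (by omega) (Nat.log2 (tn M + 1) + 1) 0 [] (by omega)]
  rw [List.nil_append, List.range_eq_range']

-- ===== keys-sorted extensionality =====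
lemma eq_of_key_sorted {α β : Type} [LinearOrder β] (key : α → β) :
    ∀ (l₁ l₂ : List α), l₁.Pairwise (fun a b => key a < key b) →
      l₂.Pairwise (fun a b => key a < key b) → (∀ x, x ∈ l₁ ↔ x ∈ l₂) → l₁ = l₂ := by
  intro l₁
  induction l₁ with
  | nil =>
    intro l₂ _ _ hm
    cases l₂ with
    | nil => rfl
    | cons b t => exact absurd ((hm b).mpr List.mem_cons_self) (by simp)
  | cons a t ih =>
    intro l₂ h₁ h₂ hm
    cases l₂ with
    | nil => exact absurd ((hm a).mp List.mem_cons_self) (by simp)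
    | cons b u =>
      have hab : a = b := by
        have ha : a ∈ b :: u := (hm a).mp List.mem_cons_self
        have hb : b ∈ a :: t := (hm b).mpr List.mem_cons_self
        rcases List.mem_cons.mp ha with h | h
        · exact h
        · rcases List.mem_cons.mp hb with h' | h'
          · exact h'.symm
          · have := (List.pairwise_cons.mp h₂).1 a h
            have := (List.pairwise_cons.mp h₁).1 b h'
            exact absurd (lt_trans ‹key b < key a› ‹key a < key b›) (lt_irrefl _)
      subst hab
      congr 1
      apply ih u (List.pairwise_cons.mp h₁).2 (List.pairwise_cons.mp h₂).2
      intro x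
      constructor
      · intro hx
        have := (hm x).mp (List.mem_cons_of_mem _ hx)
        rcases List.mem_cons.mp this with h | h
        · subst h; exact absurd ((List.pairwise_cons.mp h₁).1 x hx) (lt_irrefl _)
        · exact h
      · intro hx
        have := (hm x).mpr (List.mem_cons_of_mem _ hx)
        rcases List.mem_cons.mp this with h | h
        · subst h; exact absurd ((List.pairwise_cons.mp h₂).1 x hx) (lt_irrefl _)
        · exact h

-- ===== characterizations =====
lemma pA_iff (n : Nat) : pA n = true ↔ ∃ j, tn n + 1 = 2 ^ j := by
  unfold pA
  rw [beq_iff_eq]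
  have := land_pred_eq_zero_iff (tn n + 1) (by omega)
  simpa using this

lemma qB_of (n j : Nat) (h1 : 1 ≤ n) (h2 : tn n + 1 = 2 ^ j) :
    qB j = true ∧ fB j = [(n : Int), ((2 ^ j : Nat) : Int), (j : Int)] := by
  have ht : 8 * (2 ^ j - 1) + 1 = 8 * tn n + 1 := by
    have := Nat.two_pow_pos j; omega
  have hs : Nat.sqrt (8 * tn n + 1) = 2 * n - 1 := sqrt_of_tn n h1
  have e : (2 * n - 1) * (2 * n - 1) = 4 * (n * (n - 1)) + 1 := by
    zify [h1, show 1 ≤ 2 * n by omega]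
    ring
  have h2t := two_tn n
  constructor
  · unfold qB
    rw [ht, isqrtNat_eq_sqrt, hs, beq_iff_eq]
    omega
  · unfold fB
    rw [ht, isqrtNat_eq_sqrt, hs]
    have : (1 + (2 * n - 1)) / 2 = n := by omega
    rw [this]

lemma qB_char (j : Nat) (h : qB j = true) :
    ∃ n, 1 ≤ n ∧ tn n + 1 = 2 ^ j ∧ fB j = [(n : Int), ((2 ^ j : Nat) : Int), (j : Int)] := by
  unfold qB at h
  rw [isqrtNat_eq_sqrt, beq_iff_eq] at h
  obtain ⟨n, hn1, hn2, hn3⟩ := tn_of_sqrt (2 ^ j - 1) h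
  have hp := Nat.two_pow_pos j
  refine ⟨n, hn1, by omega, ?_⟩
  unfold fB
  rw [isqrtNat_eq_sqrt, hn3]

lemma fA_key (n : Nat) : (fA n).headI = (n : Int) := rfl

-- ===== final assembly =====
lemma main_eq (max_n : Int) (h : 1 ≤ max_n) :
    valid_periods max_n = valid_periods_alt max_n := by
  rw [valid_periods_eq max_n h, valid_periods_alt_eq max_n h]
  have hM1 : 1 ≤ max_n.toNat := by omega
  set M := max_n.toNat with hMdef
  set pmax := tn M + 1 with hpm
  set K := Nat.log2 pmax with hK
  apply eq_of_key_sorted (fun l : List Int => l.headI)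
  · -- A side pairwise
    rw [List.pairwise_map]
    refine (List.pairwise_lt_range.filter _).imp ?_
    intro a b hab
    rw [fA_key, fA_key]
    exact_mod_cast by omega
  · -- B side pairwise
    rw [List.pairwise_map, List.pairwise_filter]
    refine List.pairwise_lt_range.imp ?_
    intro a b hab hqa hqb
    obtain ⟨na, ha1, ha2, ha3⟩ := qB_char a hqa
    obtain ⟨nb, hb1, hb2, hb3⟩ := qB_char b hqb
    have hkey_a : (fB a).headI = (na : Int) := by rw [ha3]; rfl
    have hkey_b : (fB b).headI = (nb : Int) := by rw [hb3]; rfl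
    rw [hkey_a, hkey_b]
    have hpow : (2 : Nat) ^ a < 2 ^ b := Nat.pow_lt_pow_right (by omega) hab
    have : na < nb := by
      by_contra hc
      have := tn_mono (show nb ≤ na by omega)
      omega
    exact_mod_cast this
  · -- membership
    intro x
    simp only [List.mem_map, List.mem_filter, List.mem_range]
    constructor
    · rintro ⟨jj, ⟨hjj, hpa⟩, rfl⟩

      obtain ⟨j, hj⟩ := (pA_iff (jj + 1)).mp hpa
      have hle : 2 ^ j ≤ pmax := by
        have := tn_mono (show jj + 1 ≤ M by omega)
        omega
      have hjK : j ≤ K := (Nat.le_log2 (by omega)).mpr hle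
      obtain ⟨hq, hf⟩ := qB_of (jj + 1) j (by omega) hj
      refine ⟨j, ⟨by omega, hq⟩, ?_⟩
      rw [hf]
      unfold fA
      rw [hj]
      rw [bitLength_pow]
      push_cast
      ring_nf
    · rintro ⟨j, ⟨hjK, hq⟩, rfl⟩
      obtain ⟨n, hn1, hn2, hn3⟩ := qB_char j hq
      have hle : 2 ^ j ≤ pmax := Nat.le_trans
        (Nat.pow_le_pow_right (by omega) (by omega)) (Nat.log2_self_le (by omega))
      have hnM : n ≤ M := by
        by_contra hc
        have := tn_lt_of_lt hM1 (show M < n by omega)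
        omega
      refine ⟨n - 1, ⟨by omega, ?_⟩, ?_⟩
      · apply (pA_iff (n - 1 + 1)).mpr
        exact ⟨j, by rw [show n - 1 + 1 = n from by omega]; exact hn2⟩
      · rw [hn3]
        unfold fA
        rw [show n - 1 + 1 = n from by omega, hn2, bitLength_pow]
        push_cast
        ring_nf

-- ===== VERDICT (by name: the statement is the Claim_ definition above) =====
theorem valid_periods_spec : Claim_equal_valid_periods := by
  intro max_n _
  unfold Spec_valid_periods
  by_cases h : 1 ≤ max_n
  · exact main_eq max_n h
  · unfold valid_periods valid_periods_alt
    rw [PySem.List.pyRange_one_eq_nil (by omega)]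
    simp [show max_n < 1 by omega]
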